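-- pv_equiv track=rewrite | github.com/PRSM-HQ/PRSM-CLI | prsm/shared/formatters/tool_call.py | _parse_sed_substitution
-- ===== SOURCE A (Python) =====
-- def _parse_sed_substitution(expr: str) -> tuple[str, str] | None:
--     """Parse sed substitution expression like s/old/new/g."""
--     expr = expr.strip().strip("'\"")
--     if len(expr) < 4 or not expr.startswith("s"):
--         return None
--     delim = expr[1]
--     if not delim or delim.isalnum():
--         return None
--     i = 2
--     old: list[str] = []
--     new: list[str] = []
--     target = old
--     escaped = False
--     while i < len(expr):
--         ch = expr[i]
--         i += 1
--         if escaped: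
--             target.append(ch)
--             escaped = False
--             continue
--         if ch == "\\":
--             escaped = True
--             continue
--         if ch == delim:
--             if target is old:
--                 target = new
--                 continue
--             break
--         target.append(ch)
--     if target is old:
--         return None
--     return ("".join(old), "".join(new))
-- ===== SOURCE B (Python) =====
-- def _find_unescaped(expr, delim, i):
--     """Index of the first unescaped delimiter at or after i, else None."""
--     n = len(expr)
--     while i < n:
--         ch = expr[i]
--         if ch == "\\":
--             i += 2
--         elif ch == delim:
--             return i
--         else:
--             i += 1
--     return None
--
--
-- def _unescape(s):
--     """Drop each escaping backslash (a trailing lone backslash disappears)."""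
--     out = []
--     i = 0
--     while i < len(s):
--         if s[i] == "\\":
--             i += 1
--             if i < len(s):
--                 out.append(s[i])
--             i += 1
--         else:
--             out.append(s[i])
--             i += 1
--     return "".join(out)
--
--
-- def _parse_sed_substitution(expr: str) -> tuple[str, str] | None:
--     """Parse sed substitution expression like s/old/new/g."""
--     expr = expr.strip().strip("'\"")
--     if len(expr) < 4 or not expr.startswith("s"):
--         return None
--     delim = expr[1]
--     if delim.isalnum():
--         return None
--     p0 = _find_unescaped(expr, delim, 2)
--     if p0 is None:
--         return None
--     p1 = _find_unescaped(expr, delim, p0 + 1)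
--     if p1 is None:
--         p1 = len(expr)
--     return (_unescape(expr[2:p0]), _unescape(expr[p0 + 1:p1]))
-- ===== Notes on version B (the rewrite author's own statement) =====
-- stated objective: alternative
-- what changed: B replaces A's single-pass state machine (escaped flag, target pointer, two accumulator lists) by a two-phase decomposition: first locate the (up to two) unescaped delimiter positions with an index scan that skips escaped pairs, then slice out the old/new parts and drop escaping backslashes with a small unescape helper.
import Mathlib
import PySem

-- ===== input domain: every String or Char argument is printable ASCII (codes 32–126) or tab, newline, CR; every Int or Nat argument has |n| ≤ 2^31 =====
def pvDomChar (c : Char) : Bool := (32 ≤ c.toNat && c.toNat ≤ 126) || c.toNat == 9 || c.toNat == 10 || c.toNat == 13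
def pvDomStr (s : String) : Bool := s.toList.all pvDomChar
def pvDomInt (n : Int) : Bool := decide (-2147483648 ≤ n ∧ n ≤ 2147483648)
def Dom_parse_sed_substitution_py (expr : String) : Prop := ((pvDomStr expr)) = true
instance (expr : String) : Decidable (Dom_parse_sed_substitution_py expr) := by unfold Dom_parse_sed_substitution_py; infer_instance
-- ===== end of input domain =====

-- B parses in two phases (locate the unescaped delimiter positions, then slice and unescape)
-- instead of A's one-pass accumulator state machine; same cost, different decomposition.

-- ===== PORT A =====
-- A's while loop over i from 2: structural recursion over the remaining characters,
-- same state (target-is-old flag t, old, new, escaped).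
def pvLoopA (d : Char) : List Char → Bool → List Char → List Char → Bool → Bool × List Char × List Char
  | [], t, old, new, _ => (t, old, new)
  | ch :: rest, t, old, new, esc =>
    if esc then
      if t then pvLoopA d rest t (old ++ [ch]) new false
      else pvLoopA d rest t old (new ++ [ch]) false
    else if ch = '\\' then pvLoopA d rest t old new true
    else if ch = d then
      if t then pvLoopA d rest false old new false
      else (t, old, new)
    else if t then pvLoopA d rest t (old ++ [ch]) new false
    else pvLoopA d rest t old (new ++ [ch]) false

def parse_sed_substitution_py (expr : String) : Option (String × String) :=
  let e := PySem.Chars.stripChars (PySem.Chars.strip expr.toList) ['\'', '"']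
  if e.length < 4 ∨ ¬ PySem.Chars.startswith e ['s'] then none
  else
    let delim := PySem.List.pyGetD e 1 ' '
    if PySem.Chars.isalnum delim then none
    else
      let r := pvLoopA delim (e.drop 2) true [] [] false
      if r.1 then none else some (String.ofList r.2.1, String.ofList r.2.2)

-- ===== PORT B =====
-- Source B's _find_unescaped: index of the first unescaped delimiter at or after i, else none
def pvFindU (e : List Char) (d : Char) (i : Nat) : Option Nat :=
  if h : i < e.length then
    let ch := e[i]
    if ch = '\\' then pvFindU e d (i + 2)
    else if ch = d then some i
    else pvFindU e d (i + 1)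
  else none
termination_by e.length - i
-- Source B's _unescape: drop each escaping backslash (a trailing lone backslash disappears)
def pvUnescape : List Char → List Char
  | [] => []
  | c :: rest =>
    if c = '\\' then
      match rest with
      | [] => []
      | c2 :: rest2 => c2 :: pvUnescape rest2
    else c :: pvUnescape rest

def parse_sed_substitution_py_alt (expr : String) : Option (String × String) :=
  let e := PySem.Chars.stripChars (PySem.Chars.strip expr.toList) ['\'', '"']
  if e.length < 4 ∨ ¬ PySem.Chars.startswith e ['s'] then none
  else
    let delim := PySem.List.pyGetD e 1 ' '
    if PySem.Chars.isalnum delim then none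
    else
      match pvFindU e delim 2 with
      | none => none
      | some p0 =>
        let p1 := (pvFindU e delim (p0 + 1)).getD e.length
        some (String.ofList (pvUnescape (PySem.List.slice e (some (2 : Int)) (some (p0 : Int)))),
              String.ofList (pvUnescape (PySem.List.slice e (some ((p0 : Int) + 1)) (some (p1 : Int)))))

-- ===== PRECONDITION & SPEC =====
def Spec_parse_sed_substitution_py (expr : String) (out : Option (String × String)) : Prop := out = parse_sed_substitution_py_alt expr
instance (expr : String) (out : Option (String × String)) : Decidable (Spec_parse_sed_substitution_py expr out) := by unfold Spec_parse_sed_substitution_py; infer_instance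

-- ===== CLAIM (what is proved, stated in full; the proofs are below) =====
def Claim_equal_parse_sed_substitution_py : Prop := ∀ (expr : String), Dom_parse_sed_substitution_py expr → Spec_parse_sed_substitution_py expr (parse_sed_substitution_py expr)

-- ===== LEMMAS AND PROOFS =====

-- list-level version of B's unescaped-delimiter search (index relative to the list's head),
-- used to relate the two ports
def pvFindL (d : Char) (cs : List Char) : Option Nat :=
  match cs with
  | [] => none
  | c :: rest =>
    if c = '\\' then (pvFindL d rest.tail).map (· + 2)
    else if c = d then some 0
    else (pvFindL d rest).map (· + 1)
termination_by cs.length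
decreasing_by all_goals (simp; try omega)

theorem pvFindU_eq (e : List Char) (d : Char) (i : Nat) :
    pvFindU e d i = (pvFindL d (e.drop i)).map (· + i) := by
  fun_induction pvFindU e d i with
  | case1 i h ch hbs ih =>
    have hb : e[i] = '\\' := hbs
    rw [ih, List.drop_eq_getElem_cons h, pvFindL]
    rw [if_pos hb]
    rw [List.tail_drop]
    have : i + 1 + 1 = i + 2 := by omega
    rw [this]
    cases pvFindL d (e.drop (i + 2)) <;> simp <;> omega
  | case2 i h ch h1 h2 =>
    have hb : ¬ e[i] = '\\' := h1
    have hd : e[i] = d := h2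
    rw [List.drop_eq_getElem_cons h, pvFindL, if_neg hb, if_pos hd]
    simp
  | case3 i h ch h1 h2 ih =>
    have hb : ¬ e[i] = '\\' := h1
    have hd : ¬ e[i] = d := h2
    rw [ih, List.drop_eq_getElem_cons h, pvFindL, if_neg hb, if_neg hd]
    cases pvFindL d (e.drop (i + 1)) <;> simp <;> omega
  | case4 i h =>
    rw [List.drop_eq_nil_of_le (by omega)]
    simp [pvFindL]

theorem pvUnescape_cons_ne (c : Char) (r : List Char) (h : ¬ c = '\\') :
    pvUnescape (c :: r) = c :: pvUnescape r := by
  cases r <;> simp [pvUnescape, h]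

theorem pvLoop_none (d : Char) (cs : List Char) (t : Bool) (old new : List Char)
    (h : pvFindL d cs = none) :
    pvLoopA d cs t old new false =
      (t, if t then old ++ pvUnescape cs else old, if t then new else new ++ pvUnescape cs) := by
  fun_induction pvFindL d cs generalizing old new with
  | case1 => cases t <;> simp [pvLoopA, pvUnescape]
  | case2 rest ih =>
    have h' : pvFindL d rest.tail = none := by
      cases hx : pvFindL d rest.tail <;> simp [hx] at h ⊢
    cases rest with
    | nil => cases t <;> simp [pvLoopA, pvUnescape]
    | cons c2 rest2 =>
      have h2 := ih (if t then old ++ [c2] else old) (if t then new else new ++ [c2]) h'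
      cases t <;> simp_all [pvLoopA, pvUnescape]
  | case3 rest hbs => simp at h
  | case4 c rest hbs hd ih =>
    have h' : pvFindL d rest = none := by
      cases hx : pvFindL d rest <;> simp [hx] at h ⊢
    have h2 := ih (if t then old ++ [c] else old) (if t then new else new ++ [c]) h'
    cases t <;> (rw [pvLoopA, if_neg (by simp), if_neg hbs, if_neg hd]; simp_all [pvUnescape_cons_ne _ _ hbs])

theorem pvLoop_some_false (d : Char) (cs : List Char) (p : Nat) (old new : List Char)
    (h : pvFindL d cs = some p) :
    pvLoopA d cs false old new false = (false, old, new ++ pvUnescape (cs.take p)) := by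
  fun_induction pvFindL d cs generalizing p old new with
  | case1 => simp at h
  | case2 rest ih =>
    cases hx : pvFindL d rest.tail with
    | none => simp [hx] at h
    | some p' =>
      rw [hx] at h
      simp only [Option.map_some, Option.some.injEq] at h
      obtain rfl := h
      cases rest with
      | nil => simp [hx, pvFindL] at *
      | cons c2 rest2 =>
        have h2 := ih p' (old) (new ++ [c2]) (by simpa using hx)
        simp_all [pvLoopA, pvUnescape]
  | case3 rest hbs =>
    obtain rfl : p = 0 := by simp at h; omega
    simp [pvLoopA, pvUnescape, hbs]
  | case4 c rest hbs hd ih =>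
    cases hx : pvFindL d rest with
    | none => simp [hx] at h
    | some p' =>
      rw [hx] at h
      simp only [Option.map_some, Option.some.injEq] at h
      obtain rfl := h
      have h2 := ih p' old (new ++ [c]) hx
      simp_all [pvLoopA, pvUnescape_cons_ne _ _ hbs]

theorem pvLoop_some_true (d : Char) (cs : List Char) (p : Nat) (old new : List Char)
    (h : pvFindL d cs = some p) :
    pvLoopA d cs true old new false =
      pvLoopA d (cs.drop (p + 1)) false (old ++ pvUnescape (cs.take p)) new false := by
  fun_induction pvFindL d cs generalizing p old new with
  | case1 => simp at h
  | case2 rest ih =>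
    cases hx : pvFindL d rest.tail with
    | none => simp [hx] at h
    | some p' =>
      rw [hx] at h
      simp only [Option.map_some, Option.some.injEq] at h
      obtain rfl := h
      cases rest with
      | nil => simp [hx, pvFindL] at *
      | cons c2 rest2 =>
        have h2 := ih p' (old ++ [c2]) new (by simpa using hx)
        simp_all [pvLoopA, pvUnescape]
  | case3 rest hbs =>
    obtain rfl : p = 0 := by simp at h; omega
    simp [pvLoopA, pvUnescape, hbs]
  | case4 c rest hbs hd ih =>
    cases hx : pvFindL d rest with
    | none => simp [hx] at h
    | some p' =>
      rw [hx] at h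
      simp only [Option.map_some, Option.some.injEq] at h
      obtain rfl := h
      have h2 := ih p' (old ++ [c]) new hx
      simp_all [pvLoopA, pvUnescape_cons_ne _ _ hbs]

theorem main_eq (expr : String) : parse_sed_substitution_py expr = parse_sed_substitution_py_alt expr := by
  unfold parse_sed_substitution_py parse_sed_substitution_py_alt
  set e := PySem.Chars.stripChars (PySem.Chars.strip expr.toList) ['\'', '"'] with he
  by_cases hg : e.length < 4 ∨ ¬ PySem.Chars.startswith e ['s']
  · rw [if_pos hg, if_pos hg]
  · rw [if_neg hg, if_neg hg]
    set d := PySem.List.pyGetD e 1 ' ' with hd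
    by_cases ha : PySem.Chars.isalnum d
    · rw [if_pos ha, if_pos ha]
    · rw [if_neg ha, if_neg ha]
      rw [pvFindU_eq]
      cases hf : pvFindL d (e.drop 2) with
      | none =>
        rw [pvLoop_none d _ true [] [] hf]
        simp
      | some p =>
        simp only [Option.map_some]
        rw [pvLoop_some_true d _ p [] [] hf, pvFindU_eq]
        have hdd : (e.drop 2).drop (p + 1) = e.drop (p + 2 + 1) := by
          rw [List.drop_drop]; ring_nf
        rw [hdd]
        rw [show (2 : Int) = ((2 : Nat) : Int) from rfl, PySem.List.slice_natCast]
        rw [show ((p + 2 : Nat) : Int) + 1 = ((p + 2 + 1 : Nat) : Int) by push_cast; ring]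
        cases hf2 : pvFindL d (e.drop (p + 2 + 1)) with
        | none =>
          rw [pvLoop_none d _ false _ [] hf2]
          simp only [Option.map_none, Option.getD_none]
          rw [PySem.List.slice_natCast]
          have htake : (e.drop (p + 2 + 1)).take (e.length - (p + 2 + 1)) = e.drop (p + 2 + 1) := by
            apply List.take_of_length_le; simp
          simp [htake]
        | some q =>
          rw [pvLoop_some_false d _ q _ [] hf2]
          simp only [Option.map_some, Option.getD_some]
          rw [PySem.List.slice_natCast]
          simp

-- ===== VERDICT (by name: the statement is the Claim_ definition above) =====
theorem parse_sed_substitution_py_spec : Claim_equal_parse_sed_substitution_py :=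
  fun expr _ => main_eq expr
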